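-- pv_equiv track=rewrite | github.com/ekouakou/APP_RADAR_CHECK | radar_check_api_python/pythonProject/api/proression/AnalyseurTirage.py | trouver_suites_arithmetiques
-- ===== SOURCE A (Python) =====
-- def trouver_suites_arithmetiques(numeros, params):
--     """Trouve les suites arithmétiques dans une liste de nombres"""
--     suites = []
--     n = len(numeros)
--
--     # Si nous devons respecter l'ordre chronologique
--     if params.get('respecter_ordre_chronologique', False):
--         numeros_avec_indices = [(i, num) for i, num in enumerate(numeros)]
--
--         for i in range(n - 1):
--             for j in range(i + 1, n):
--                 # Vérifier que j > i pour respecter l'ordre chronologique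
--                 raison = numeros[j] - numeros[i]
--                 if raison == 0:
--                     continue
--
--                 suite = [numeros[i], numeros[j]]
--                 indices_suite = [i, j]
--                 raisons = [raison]
--                 prochain = numeros[j] + raison
--                 dernier_indice = j
--
--                 # Chercher les éléments suivants en respectant l'ordre chronologique
--                 for k in range(j + 1, n):
--                     if numeros[k] == prochain and k > dernier_indice:
--                         suite.append(numeros[k])
--                         indices_suite.append(k)
--                         raisons.append(raison)
--                         prochain += raison
--                         dernier_indice = k
--
--                 if len(suite) >= params['min_elements'] or not params['forcer_min']:
--                     suites.append((suite, raisons))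
--     else:
--         # Code original si on ne respecte pas l'ordre chronologique
--         for i in range(n - 1):
--             for j in range(i + 1, n):
--                 raison = numeros[j] - numeros[i]
--                 if raison == 0:
--                     continue
--
--                 suite = [numeros[i], numeros[j]]
--                 raisons = [raison]
--                 prochain = numeros[j] + raison
--
--                 for k in range(j + 1, n):
--                     if numeros[k] == prochain:
--                         suite.append(numeros[k])
--                         raisons.append(raison)
--                         prochain += raison
--
--                 if len(suite) >= params['min_elements'] or not params['forcer_min']:
--                     suites.append((suite, raisons))
--
--     return suites
-- ===== SOURCE B (Python) =====
-- def _first_greater(lst, pos):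
--     """First element of lst strictly greater than pos (lst ascending), or None."""
--     for t in lst:
--         if t > pos:
--             return t
--     return None
--
--
-- def trouver_suites_arithmetiques(numeros, params):
--     """Index-based version: one value->ascending-indices dictionary built once;
--     extending a suite jumps straight to the next index holding the wanted value
--     instead of rescanning the tail of the list.  The 'respecter_ordre_chronologique'
--     flag is ignored: both branches of the original produce the same result."""
--     n = len(numeros)
--     positions = {}
--     for idx, v in enumerate(numeros):
--         positions.setdefault(v, []).append(idx)
--     suites = []
--     for i in range(n - 1):
--         for j in range(i + 1, n):
--             raison = numeros[j] - numeros[i]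
--             if raison == 0:
--                 continue
--             suite = [numeros[i], numeros[j]]
--             prochain = numeros[j] + raison
--             pos = j
--             while True:
--                 k = _first_greater(positions.get(prochain, []), pos)
--                 if k is None:
--                     break
--                 suite.append(prochain)
--                 pos = k
--                 prochain += raison
--             if len(suite) >= params['min_elements'] or not params['forcer_min']:
--                 suites.append((suite, [raison] * (len(suite) - 1)))
--     return suites
-- ===== Notes on version B (the rewrite author's own statement) =====
-- stated objective: alternative
-- what changed: B builds a value->ascending-indices dictionary once and extends each starting pair by jumping to the next index holding the wanted value (scanning only that value's occurrence list) instead of A's rescan of the whole tail for every pair; B drops the 'respecter_ordre_chronologique' branch, whose extra index bookkeeping provably never changes the result, and emits the raisons list as a single replication.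
import Mathlib
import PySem

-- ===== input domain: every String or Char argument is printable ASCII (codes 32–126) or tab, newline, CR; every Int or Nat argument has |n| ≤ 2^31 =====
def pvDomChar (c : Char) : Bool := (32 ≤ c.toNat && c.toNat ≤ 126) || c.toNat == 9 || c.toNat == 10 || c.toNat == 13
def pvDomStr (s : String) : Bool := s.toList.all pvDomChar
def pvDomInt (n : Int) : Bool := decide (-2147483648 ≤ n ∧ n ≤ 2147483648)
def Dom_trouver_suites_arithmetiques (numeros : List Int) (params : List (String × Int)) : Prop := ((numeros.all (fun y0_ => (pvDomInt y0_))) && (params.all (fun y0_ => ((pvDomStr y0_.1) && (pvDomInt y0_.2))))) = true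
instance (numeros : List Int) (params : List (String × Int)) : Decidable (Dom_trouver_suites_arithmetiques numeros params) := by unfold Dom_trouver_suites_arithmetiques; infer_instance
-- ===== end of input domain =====

-- B replaces A's per-pair rescan of the whole tail by one value→ascending-indices
-- dictionary and direct jumps to the next matching index (objective: alternative).

-- params is a Python dict: lookup = first match in the association list
def pvParamGetD (params : List (String × Int)) (k : String) (d : Int) : Int :=
  (List.lookup k params).getD d

-- ===== PORT A =====
-- inner 'for k in range(j+1, n)' of the chronological branch (state: suite, indices_suite, raisons, prochain, dernier_indice)
def pvAScanChrono (numeros ks suite indices raisons : List Int) (raison prochain dernier : Int) :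
    List Int × List Int × List Int :=
  match ks with
  | [] => (suite, indices, raisons)
  | k :: rest =>
    if PySem.List.pyGetD numeros k 0 = prochain ∧ dernier < k then
      pvAScanChrono numeros rest (suite ++ [PySem.List.pyGetD numeros k 0]) (indices ++ [k])
        (raisons ++ [raison]) raison (prochain + raison) k
    else
      pvAScanChrono numeros rest suite indices raisons raison prochain dernier

-- inner 'for k in range(j+1, n)' of the plain branch (state: suite, raisons, prochain)
def pvAScan (numeros ks suite raisons : List Int) (raison prochain : Int) : List Int × List Int :=
  match ks with
  | [] => (suite, raisons)
  | k :: rest =>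
    if PySem.List.pyGetD numeros k 0 = prochain then
      pvAScan numeros rest (suite ++ [PySem.List.pyGetD numeros k 0]) (raisons ++ [raison])
        raison (prochain + raison)
    else
      pvAScan numeros rest suite raisons raison prochain

-- indices are always in range, so numeros[x] is pyGetD numeros x 0;
-- params['min_elements'] / params['forcer_min']: on Pre_ these lookups are exact
-- (Pre_ guarantees the key is present whenever Python consults it, see Pre_ below)
def trouver_suites_arithmetiques (numeros : List Int) (params : List (String × Int)) :
    List (List Int × List Int) :=
  let n : Int := numeros.length
  if pvParamGetD params "respecter_ordre_chronologique" 0 ≠ 0 then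
    let _numeros_avec_indices := PySem.List.enumerate numeros   -- built by A, never used
    (PySem.List.pyRange 0 (n - 1) 1).foldl (fun suites i =>
      (PySem.List.pyRange (i + 1) n 1).foldl (fun suites j =>
        let raison := PySem.List.pyGetD numeros j 0 - PySem.List.pyGetD numeros i 0
        if raison = 0 then suites
        else
          let res := pvAScanChrono numeros (PySem.List.pyRange (j + 1) n 1)
            [PySem.List.pyGetD numeros i 0, PySem.List.pyGetD numeros j 0] [i, j] [raison]
            raison (PySem.List.pyGetD numeros j 0 + raison) j
          if pvParamGetD params "min_elements" 0 ≤ (res.1.length : Int) ∨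
              pvParamGetD params "forcer_min" 0 = 0 then
            suites ++ [(res.1, res.2.2)]
          else suites) suites) []
  else
    (PySem.List.pyRange 0 (n - 1) 1).foldl (fun suites i =>
      (PySem.List.pyRange (i + 1) n 1).foldl (fun suites j =>
        let raison := PySem.List.pyGetD numeros j 0 - PySem.List.pyGetD numeros i 0
        if raison = 0 then suites
        else
          let res := pvAScan numeros (PySem.List.pyRange (j + 1) n 1)
            [PySem.List.pyGetD numeros i 0, PySem.List.pyGetD numeros j 0] [raison]
            raison (PySem.List.pyGetD numeros j 0 + raison)
          if pvParamGetD params "min_elements" 0 ≤ (res.1.length : Int) ∨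
              pvParamGetD params "forcer_min" 0 = 0 then
            suites ++ [res]
          else suites) suites) []

-- ===== PORT B =====
-- helper _first_greater: first element of lst strictly greater than pos, or None
def pvFirstGreater (lst : List Int) (pos : Int) : Option Int :=
  match lst with
  | [] => none
  | t :: rest => if pos < t then some t else pvFirstGreater rest pos

-- 'for idx, v in enumerate(numeros): positions.setdefault(v, []).append(idx)'
def pvPositions (numeros : List Int) : PySem.Dict Int (List Int) :=
  (PySem.List.enumerate numeros).foldl (fun d p => d.modify p.2 [] (· ++ [p.1])) PySem.Dict.empty

-- the 'while True' extension loop; fuel = len(numeros) (the loop iterates fewer than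
-- len(numeros) times since pos strictly increases within [0, len) — fuel 0 is never reached)
def pvBExtend (positions : PySem.Dict Int (List Int)) (raison : Int) (fuel : Nat)
    (prochain pos : Int) (suite : List Int) : List Int :=
  match fuel with
  | 0 => suite
  | f + 1 =>
    match pvFirstGreater (positions.getD prochain []) pos with
    | none => suite
    | some k => pvBExtend positions raison f (prochain + raison) k (suite ++ [prochain])

def trouver_suites_arithmetiques_alt (numeros : List Int) (params : List (String × Int)) :
    List (List Int × List Int) :=
  let n : Int := numeros.length
  let positions := pvPositions numeros
  (PySem.List.pyRange 0 (n - 1) 1).foldl (fun suites i =>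
    (PySem.List.pyRange (i + 1) n 1).foldl (fun suites j =>
      let raison := PySem.List.pyGetD numeros j 0 - PySem.List.pyGetD numeros i 0
      if raison = 0 then suites
      else
        let suite := pvBExtend positions raison numeros.length
          (PySem.List.pyGetD numeros j 0 + raison) j
          [PySem.List.pyGetD numeros i 0, PySem.List.pyGetD numeros j 0]
        if pvParamGetD params "min_elements" 0 ≤ (suite.length : Int) ∨
            pvParamGetD params "forcer_min" 0 = 0 then
          suites ++ [(suite, List.replicate (suite.length - 1) raison)]
        else suites) suites) []

-- ===== PRECONDITION & SPEC =====
-- Pre_ excludes exactly the inputs on which the Python A raises KeyError rather than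
-- returning: 'min_elements' missing, or 'forcer_min' missing with min_elements ≥ 3,
-- while numeros has two distinct values (then some extremal starting pair never extends,
-- so the short-circuited 'or' consults the missing key); when numeros has fewer than two
-- distinct values the keys are never consulted and A returns [], so those inputs are kept,
-- as are missing-'forcer_min' inputs with min_elements ≤ 2, where every suite (length ≥ 2)
-- satisfies the first disjunct and the 'or' always short-circuits.
def Pre_trouver_suites_arithmetiques (numeros : List Int) (params : List (String × Int)) : Prop :=
  ((List.lookup "min_elements" params).isSome = true ∧
    ((List.lookup "forcer_min" params).isSome = true ∨
      (List.lookup "min_elements" params).getD 0 ≤ 2))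
  ∨ (∀ x ∈ numeros, ∀ y ∈ numeros, x = y)
instance (numeros : List Int) (params : List (String × Int)) :
    Decidable (Pre_trouver_suites_arithmetiques numeros params) := by
  unfold Pre_trouver_suites_arithmetiques; infer_instance

def pvWitness_trouver_suites_arithmetiques : List Int × (List (String × Int)) :=
  ([1, 2, 3, 5], [("min_elements", 3), ("forcer_min", 1)])

def Spec_trouver_suites_arithmetiques (numeros : List Int) (params : List (String × Int))
    (out : List (List Int × List Int)) : Prop := out = trouver_suites_arithmetiques_alt numeros params
instance (numeros : List Int) (params : List (String × Int)) (out : List (List Int × List Int)) :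
    Decidable (Spec_trouver_suites_arithmetiques numeros params out) := by
  unfold Spec_trouver_suites_arithmetiques; infer_instance

-- ===== CLAIM (what is proved, stated in full; the proofs are below) =====
def Claim_equal_trouver_suites_arithmetiques : Prop := ∀ (numeros : List Int) (params : List (String × Int)), Dom_trouver_suites_arithmetiques numeros params → Pre_trouver_suites_arithmetiques numeros params → Spec_trouver_suites_arithmetiques numeros params (trouver_suites_arithmetiques numeros params)

-- ===== LEMMAS AND PROOFS =====

-- the ascending list of indices of numeros holding value v
def pvOcc (numeros : List Int) (v : Int) : List Int :=
  (PySem.List.pyRange 0 numeros.length 1).filter (fun j => PySem.List.pyGetD numeros j 0 == v)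

lemma pvPositions_getD (numeros : List Int) (v : Int) :
    (pvPositions numeros).getD v [] = pvOcc numeros v := by
  unfold pvPositions pvOcc
  rw [PySem.List.enumerate_eq_map_pyRange numeros 0]
  rw [List.foldl_map]
  have hswap : (List.foldl (fun d (j : Int) => PySem.Dict.modify d ((j, PySem.List.pyGetD numeros j 0)).2 [] (· ++ [((j, PySem.List.pyGetD numeros j 0)).1])) PySem.Dict.empty (PySem.List.pyRange 0 (PySem.List.len numeros) 1))
      = (List.foldl (fun d (p : Int × Int) => PySem.Dict.modify d p.1 [] (· ++ [p.2])) PySem.Dict.empty ((PySem.List.pyRange 0 (PySem.List.len numeros) 1).map (fun j => (PySem.List.pyGetD numeros j 0, j)))) := by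
    rw [List.foldl_map]
  rw [hswap, PySem.Dict.getD_foldl_modify_append]
  simp [List.filter_map, Function.comp_def, PySem.List.len]

lemma mem_pvOcc {numeros : List Int} {v t : Int} :
    t ∈ pvOcc numeros v ↔ 0 ≤ t ∧ t < (numeros.length : Int) ∧ PySem.List.pyGetD numeros t 0 = v := by
  simp [pvOcc, List.mem_filter, PySem.List.mem_pyRange_one, and_assoc]

lemma pairwise_pvOcc (numeros : List Int) (v : Int) :
    (pvOcc numeros v).Pairwise (· < ·) :=
  (PySem.List.pairwise_lt_pyRange_one 0 numeros.length).filter _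

lemma pvFirstGreater_none {lst : List Int} {pos : Int} (h : ∀ t ∈ lst, ¬ pos < t) :
    pvFirstGreater lst pos = none := by
  induction lst with
  | nil => rfl
  | cons t rest ih =>
    simp only [pvFirstGreater]
    rw [if_neg (h t (by simp))]
    exact ih (fun x hx => h x (by simp [hx]))

lemma pvFirstGreater_some {lst : List Int} {pos k : Int} (h : pvFirstGreater lst pos = some k) :
    k ∈ lst ∧ pos < k := by
  induction lst with
  | nil => simp [pvFirstGreater] at h
  | cons t rest ih =>
    simp only [pvFirstGreater] at h
    by_cases hp : pos < t
    · rw [if_pos hp] at h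
      obtain rfl : t = k := by simpa using h
      exact ⟨by simp, hp⟩
    · rw [if_neg hp] at h
      obtain ⟨h1, h2⟩ := ih h
      exact ⟨by simp [h1], h2⟩

lemma pvFirstGreater_eq_some {lst : List Int} {pos k : Int} (hp : lst.Pairwise (· < ·))
    (hk : k ∈ lst) (hlt : pos < k) (hmin : ∀ t ∈ lst, pos < t → k ≤ t) :
    pvFirstGreater lst pos = some k := by
  induction lst with
  | nil => simp at hk
  | cons t rest ih =>
    simp only [pvFirstGreater]
    by_cases hpt : pos < t
    · rw [if_pos hpt]
      rcases List.mem_cons.1 hk with rfl | hmem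
      · rfl
      · exfalso
        have htk : t < k := (List.pairwise_cons.1 hp).1 k hmem
        have := hmin t (by simp) hpt
        omega
    · rw [if_neg hpt]
      rcases List.mem_cons.1 hk with rfl | hmem
      · omega
      · exact ih (List.pairwise_cons.1 hp).2 hmem (fun x hx hpx => hmin x (by simp [hx]) hpx)

lemma pvFirstGreater_congr {lst : List Int} {pos pos' : Int}
    (h : ∀ t ∈ lst, (pos < t ↔ pos' < t)) :
    pvFirstGreater lst pos = pvFirstGreater lst pos' := by
  induction lst with
  | nil => rfl
  | cons t rest ih =>
    simp only [pvFirstGreater]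
    by_cases hp : pos < t
    · rw [if_pos hp, if_pos ((h t (by simp)).1 hp)]
    · rw [if_neg hp, if_neg (fun hp' => hp ((h t (by simp)).2 hp'))]
      exact ih (fun x hx => h x (by simp [hx]))

-- the greedy chain of values appended after the starting pair, driven by pvOcc
def pvChain (numeros : List Int) (raison : Int) (fuel : Nat) (prochain pos : Int) : List Int :=
  match fuel with
  | 0 => []
  | f + 1 =>
    match pvFirstGreater (pvOcc numeros prochain) pos with
    | none => []
    | some k => prochain :: pvChain numeros raison f (prochain + raison) k

lemma pvBExtend_eq_chain (numeros : List Int) (raison : Int) :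
    ∀ (f : Nat) (prochain pos : Int) (suite : List Int),
    pvBExtend (pvPositions numeros) raison f prochain pos suite
      = suite ++ pvChain numeros raison f prochain pos := by
  intro f
  induction f with
  | zero => intro prochain pos suite; simp [pvBExtend, pvChain]
  | succ f ih =>
    intro prochain pos suite
    simp only [pvBExtend, pvChain, pvPositions_getD]
    cases h : pvFirstGreater (pvOcc numeros prochain) pos with
    | none => simp
    | some k => simp [ih]

lemma pvChain_nil {numeros : List Int} {raison prochain pos : Int}
    (h : pvFirstGreater (pvOcc numeros prochain) pos = none) (f : Nat) :
    pvChain numeros raison f prochain pos = [] := by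
  cases f with
  | zero => rfl
  | succ f => simp [pvChain, h]

lemma pvChain_fuel {numeros : List Int} {raison : Int} :
    ∀ (f f' : Nat) (prochain pos : Int), 0 ≤ pos →
    ((numeros.length : Int) - pos).toNat ≤ f → ((numeros.length : Int) - pos).toNat ≤ f' →
    pvChain numeros raison f prochain pos = pvChain numeros raison f' prochain pos := by
  intro f
  induction f with
  | zero =>
    intro f' prochain pos hpos hf hf'
    have h0 : pvFirstGreater (pvOcc numeros prochain) pos = none := by
      apply pvFirstGreater_none
      intro t ht
      have := mem_pvOcc.1 ht
      omega
    rw [pvChain_nil h0, pvChain_nil h0]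
  | succ f ih =>
    intro f' prochain pos hpos hf hf'
    cases f' with
    | zero =>
      have h0 : pvFirstGreater (pvOcc numeros prochain) pos = none := by
        apply pvFirstGreater_none
        intro t ht
        have := mem_pvOcc.1 ht
        omega
      rw [pvChain_nil h0, pvChain_nil h0]
    | succ f' =>
      simp only [pvChain]
      cases h : pvFirstGreater (pvOcc numeros prochain) pos with
      | none => rfl
      | some k =>
        obtain ⟨hk, hpk⟩ := pvFirstGreater_some h
        have := mem_pvOcc.1 hk
        show prochain :: pvChain numeros raison f (prochain + raison) k
            = prochain :: pvChain numeros raison f' (prochain + raison) k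
        rw [ih f' (prochain + raison) k (by omega) (by omega) (by omega)]

lemma pvAScan_eq_chain (numeros : List Int) (raison : Int) :
    ∀ (f : Nat) (p prochain : Int) (suite raisons : List Int), 0 ≤ p →
    ((numeros.length : Int) - p).toNat ≤ f →
    pvAScan numeros (PySem.List.pyRange (p + 1) numeros.length 1) suite raisons raison prochain
      = (suite ++ pvChain numeros raison f prochain p,
         raisons ++ List.replicate (pvChain numeros raison f prochain p).length raison) := by
  intro f
  induction f with
  | zero =>
    intro p prochain suite raisons hp hf
    rw [PySem.List.pyRange_one_eq_nil (by omega)]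
    simp [pvAScan, pvChain]
  | succ f ih =>
    intro p prochain suite raisons hp hf
    by_cases hlt : p + 1 < (numeros.length : Int)
    case neg =>
      rw [PySem.List.pyRange_one_eq_nil (by omega)]
      have h0 : pvFirstGreater (pvOcc numeros prochain) p = none := by
        apply pvFirstGreater_none; intro t ht; have := mem_pvOcc.1 ht; omega
      rw [pvChain_nil h0]
      simp [pvAScan]
    case pos =>
      rw [PySem.List.pyRange_one_cons hlt]
      simp only [pvAScan]
      by_cases hm : PySem.List.pyGetD numeros (p + 1) 0 = prochain
      · rw [if_pos hm]
        have hfg : pvFirstGreater (pvOcc numeros prochain) p = some (p + 1) := by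
          apply pvFirstGreater_eq_some (pairwise_pvOcc numeros prochain)
          · exact mem_pvOcc.2 ⟨by omega, hlt, hm⟩
          · omega
          · intro t ht hpt; have := mem_pvOcc.1 ht; omega
        rw [ih (p + 1) (prochain + raison) _ _ (by omega) (by omega)]
        simp only [pvChain, hfg]
        simp [hm, List.replicate_succ]
      · rw [if_neg hm]
        rw [ih (p + 1) prochain suite raisons (by omega) (by omega)]
        have hcongr : pvFirstGreater (pvOcc numeros prochain) p
            = pvFirstGreater (pvOcc numeros prochain) (p + 1) := by
          apply pvFirstGreater_congr
          intro t ht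
          have h1 := mem_pvOcc.1 ht
          constructor
          · intro h2
            rcases lt_or_ge (p + 1) t with h3 | h3
            · exact h3
            · exfalso; have : t = p + 1 := by omega
              subst this; exact hm h1.2.2
          · omega
        have hkey : pvChain numeros raison (f + 1) prochain p
            = pvChain numeros raison f prochain (p + 1) := by
          simp only [pvChain, hcongr]
          cases h : pvFirstGreater (pvOcc numeros prochain) (p + 1) with
          | none => exact (pvChain_nil h f).symm
          | some k =>
            obtain ⟨hk, hpk⟩ := pvFirstGreater_some h
            have hkb := mem_pvOcc.1 hk
            cases f with
            | zero => exfalso; omega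
            | succ f2 =>
              show prochain :: pvChain numeros raison (f2 + 1) (prochain + raison) k
                  = pvChain numeros raison (f2 + 1) prochain (p + 1)
              conv_rhs => rw [pvChain]
              rw [h]
              rw [pvChain_fuel (f2 + 1) f2 (prochain + raison) k (by omega) (by omega) (by omega)]
        rw [hkey]

lemma pvAScanChrono_eq (numeros : List Int) :
    ∀ (ks suite indices raisons : List Int) (raison prochain dernier : Int),
    ks.Pairwise (· < ·) → (∀ k ∈ ks, dernier < k) →
    ((pvAScanChrono numeros ks suite indices raisons raison prochain dernier).1,
     (pvAScanChrono numeros ks suite indices raisons raison prochain dernier).2.2)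
      = pvAScan numeros ks suite raisons raison prochain := by
  intro ks
  induction ks with
  | nil => intro suite indices raisons raison prochain dernier _ _; rfl
  | cons k rest ih =>
    intro suite indices raisons raison prochain dernier hp hd
    simp only [pvAScanChrono, pvAScan]
    by_cases hm : PySem.List.pyGetD numeros k 0 = prochain
    · rw [if_pos ⟨hm, hd k (by simp)⟩, if_pos hm]
      exact ih _ _ _ _ _ _ (List.pairwise_cons.1 hp).2 (fun x hx => (List.pairwise_cons.1 hp).1 x hx)
    · rw [if_neg (fun h => hm h.1), if_neg hm]
      exact ih _ _ _ _ _ _ (List.pairwise_cons.1 hp).2 (fun x hx => hd x (by simp [hx]))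

-- A's inner scan from a starting pair equals B's jump-based extension plus replicated raisons
lemma pvScan_pair (numeros : List Int) (raison prochain j x y : Int) (hj : 0 ≤ j) :
    pvAScan numeros (PySem.List.pyRange (j + 1) numeros.length 1) [x, y] [raison] raison prochain
      = (pvBExtend (pvPositions numeros) raison numeros.length prochain j [x, y],
         List.replicate ((pvBExtend (pvPositions numeros) raison numeros.length prochain j [x, y]).length - 1) raison) := by
  rw [pvAScan_eq_chain numeros raison numeros.length j prochain [x, y] [raison] hj (by omega)]
  rw [pvBExtend_eq_chain]
  simp [List.replicate_succ]

-- ===== VERDICT (by name: the statement is the Claim_ definition above) =====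
theorem trouver_suites_arithmetiques_spec : Claim_equal_trouver_suites_arithmetiques := by
  intro numeros params _ _
  unfold Spec_trouver_suites_arithmetiques trouver_suites_arithmetiques trouver_suites_arithmetiques_alt
  dsimp only
  by_cases hc : pvParamGetD params "respecter_ordre_chronologique" 0 ≠ 0
  · rw [if_pos hc]
    apply PySem.List.foldl_congr_mem'
    intro i hi acc
    apply PySem.List.foldl_congr_mem'
    intro j hj acc2
    obtain ⟨hi0, _⟩ := PySem.List.mem_pyRange_one.1 hi
    obtain ⟨hij, hjn⟩ := PySem.List.mem_pyRange_one.1 hj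
    by_cases hr : PySem.List.pyGetD numeros j 0 - PySem.List.pyGetD numeros i 0 = 0
    · rw [if_pos hr, if_pos hr]
    · rw [if_neg hr, if_neg hr]
      have hpair := pvAScanChrono_eq numeros (PySem.List.pyRange (j + 1) numeros.length 1)
        [PySem.List.pyGetD numeros i 0, PySem.List.pyGetD numeros j 0] [i, j]
        [PySem.List.pyGetD numeros j 0 - PySem.List.pyGetD numeros i 0]
        (PySem.List.pyGetD numeros j 0 - PySem.List.pyGetD numeros i 0)
        (PySem.List.pyGetD numeros j 0 + (PySem.List.pyGetD numeros j 0 - PySem.List.pyGetD numeros i 0)) j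
        (PySem.List.pairwise_lt_pyRange_one _ _)
        (fun k hk => (PySem.List.mem_pyRange_one.1 hk).1.trans_lt' (by omega))
      rw [pvScan_pair numeros _ _ j _ _ (by omega)] at hpair
      have h1 := congrArg Prod.fst hpair
      have h2 := congrArg Prod.snd hpair
      dsimp at h1 h2
      rw [h1, h2]
  · rw [if_neg hc]
    apply PySem.List.foldl_congr_mem'
    intro i hi acc
    apply PySem.List.foldl_congr_mem'
    intro j hj acc2
    obtain ⟨hi0, _⟩ := PySem.List.mem_pyRange_one.1 hi
    obtain ⟨hij, hjn⟩ := PySem.List.mem_pyRange_one.1 hj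
    by_cases hr : PySem.List.pyGetD numeros j 0 - PySem.List.pyGetD numeros i 0 = 0
    · rw [if_pos hr, if_pos hr]
    · rw [if_neg hr, if_neg hr]
      rw [pvScan_pair numeros _ _ j _ _ (by omega)]
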